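-- pv_equiv track=rewrite | github.com/Dysaca22/Bot-Telegram | secu.py | mainSecuancia
-- ===== SOURCE A (Python) =====
-- def Sec(secuencia,sec_t):
--   i = 0
--   j = i + 1
--   k = 2
--   while i < (len(secuencia)-1):
--     sw = False
--     valor = secuencia[i] + secuencia[j]
--     k = j+1
--     while k < len(secuencia):
--       if valor == secuencia[k]:
--         if i == 0:
--           sec_t.append(secuencia[i])
--           sec_t.append(secuencia[j])
--         sec_t.append(secuencia[k])
--         i = j;j = k
--         sw = True
--         break
--       k = k+1
--     if sw == False:
--       break
--   return sec_t
--
-- def mainSecuancia(secu):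
--     tam = 0
--     resp = []
--     while (not secu == 0) and tam < len(secu):
--       sec_t = []
--       sec_t = Sec(secu, sec_t)
--       if tam < len(sec_t):
--         tam = len(sec_t)
--         resp = sec_t
--       secu.pop(0)
--     return resp
-- ===== SOURCE B (Python) =====
-- def mainSecuancia(secu):
--     # Return-value equivalent to A; unlike A, B does NOT mutate secu (A pops it partially empty).
--     n = len(secu)
--     pos = {}
--     for idx, v in enumerate(secu):
--         pos.setdefault(v, []).append(idx)
--
--     def chain(d):
--         i, j = d, d + 1
--         out = []
--         while True:
--             target = secu[i] + secu[j]
--             k = next((x for x in pos.get(target, []) if x > j), None)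
--             if k is None:
--                 return out
--             if not out:
--                 out = [secu[i], secu[j]]
--             out.append(secu[k])
--             i, j = j, k
--
--     best = []
--     for d in range(n - 1):
--         if n - d <= len(best):
--             break
--         c = chain(d)
--         if len(c) > len(best):
--             best = c
--     return best
-- ===== Notes on version B (the rewrite author's own statement) =====
-- stated objective: faster
-- what changed: B precomputes one hash map value->ascending occurrence indices and extends each greedy chain by taking the first stored occurrence beyond j, replacing A's per-step linear rescan of the whole tail and A's repeated pop(0)/re-run of Sec on physical suffixes by a single indexed loop over start positions with the same early-stop and strict-improvement tie-break; B does not mutate secu (A leaves it partially emptied).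
import Mathlib
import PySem

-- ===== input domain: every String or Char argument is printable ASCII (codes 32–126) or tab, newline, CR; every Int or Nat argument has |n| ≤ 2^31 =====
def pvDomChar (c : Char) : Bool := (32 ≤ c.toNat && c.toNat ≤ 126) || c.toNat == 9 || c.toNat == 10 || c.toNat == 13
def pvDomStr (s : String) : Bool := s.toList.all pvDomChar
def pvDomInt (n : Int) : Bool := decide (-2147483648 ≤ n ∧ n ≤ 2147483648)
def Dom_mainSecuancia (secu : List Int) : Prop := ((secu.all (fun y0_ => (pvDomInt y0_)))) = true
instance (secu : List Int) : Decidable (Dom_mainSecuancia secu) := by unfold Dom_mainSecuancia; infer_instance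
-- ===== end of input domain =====

-- B replaces A's per-step linear rescan by a precomputed value→occurrence-indices map (faster, measured);
-- equivalence is about the RETURN value only: Python A partially empties `secu` via pop(0), B does not mutate it.

-- ===== PORT A =====
-- inner `while k < len(secuencia): if valor == secuencia[k]: … break; k = k+1` — returns the matching k (None = no match)
def secAInner (s : List Int) (valor : Int) (k : Int) : Option Int :=
  if k < (s.length : Int) then
    if valor = PySem.List.pyGetD s k 0 then some k
    else secAInner s valor (k + 1)
  else none
termination_by ((s.length : Int) - k).toNat
decreasing_by omega

-- the port's termination needs the scan's bounds, so this lemma stays above the claim block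
theorem secAInner_some_bounds (s : List Int) (valor : Int) (k : Int) (r : Int)
    (h : secAInner s valor k = some r) : k ≤ r ∧ r < (s.length : Int) := by
  fun_induction secAInner s valor k with
  | case1 k hk hv => simp_all
  | case2 k hk hv ih => rcases ih h with ⟨h1, h2⟩; omega
  | case3 k hk => simp_all

-- outer `while i < len(secuencia)-1` of Sec
def secALoop (s : List Int) (i j : Int) (sec_t : List Int) : List Int :=
  if i < (s.length : Int) - 1 then
    let valor := PySem.List.pyGetD s i 0 + PySem.List.pyGetD s j 0
    match h : secAInner s valor (j + 1) with
    | some k =>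
        let t := if i = 0 then sec_t ++ [PySem.List.pyGetD s i 0, PySem.List.pyGetD s j 0] else sec_t
        secALoop s j k (t ++ [PySem.List.pyGetD s k 0])
    | none => sec_t
  else sec_t
termination_by ((s.length : Int) - j).toNat
decreasing_by
  rcases secAInner_some_bounds _ _ _ _ h with ⟨h1, h2⟩; omega

def Sec (secuencia sec_t : List Int) : List Int := secALoop secuencia 0 1 sec_t

-- `while (not secu == 0) and tam < len(secu)` — `not secu == 0` is always True for a list;
-- `tam` is a length so it is carried as a Nat; `secu.pop(0)` = recurse on `secu.drop 1`
def mainLoopA (secu : List Int) (tam : Nat) (resp : List Int) : List Int :=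
  if tam < secu.length then
    let sec_t := Sec secu []
    if tam < sec_t.length then mainLoopA (secu.drop 1) sec_t.length sec_t
    else mainLoopA (secu.drop 1) tam resp
  else resp
termination_by secu.length
decreasing_by all_goals simp; omega

def mainSecuancia (secu : List Int) : List Int := mainLoopA secu 0 []

-- ===== PORT B =====
-- pos = {}; for idx, v in enumerate(secu): pos.setdefault(v, []).append(idx)
def posMap (s : List Int) : PySem.Dict Int (List Int) :=
  (PySem.List.enumerate s).foldl (fun d p => d.modify p.2 [] (fun l => l ++ [p.1])) PySem.Dict.empty

-- next((x for x in pos.get(target, []) if x > j), None)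
def chainNext (pos : PySem.Dict Int (List Int)) (target j : Int) : Option Int :=
  (pos.getD target []).find? (fun x => decide (j < x))

-- characterization of the map: indices (in order) whose value equals v; chainLoop's termination needs it
theorem posMap_getD (s : List Int) (v : Int) :
    (posMap s).getD v [] =
      (PySem.List.pyRange 0 s.length 1).filter (fun k => PySem.List.pyGetD s k 0 == v) := by
  unfold posMap
  have h1 : (PySem.List.enumerate s).foldl
        (fun d p => d.modify p.2 [] (fun l => l ++ [p.1])) PySem.Dict.empty
      = ((PySem.List.enumerate s).map Prod.swap).foldl
        (fun d p => d.modify p.1 [] (fun l => l ++ [p.2])) PySem.Dict.empty := by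
    rw [List.foldl_map]; rfl
  rw [h1, PySem.Dict.getD_foldl_modify_append]
  rw [PySem.List.enumerate_eq_map_pyRange s 0]
  simp [List.filter_map, List.map_map, Function.comp_def]

theorem chainNext_posMap_bounds (s : List Int) (target j r : Int)
    (h : chainNext (posMap s) target j = some r) : j < r ∧ r < (s.length : Int) := by
  have hmem := List.mem_of_find?_eq_some h
  have hpred := List.find?_some h
  refine ⟨by simpa using hpred, ?_⟩
  rw [posMap_getD] at hmem
  have := List.mem_of_mem_filter hmem
  have := (PySem.List.mem_pyRange_one).1 this
  omega

-- the `while True` body of chain(d); pos is the hoisted value→indices map of the whole list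
def chainLoop (s : List Int) (i j : Int) (out : List Int) : List Int :=
  match h : chainNext (posMap s) (PySem.List.pyGetD s i 0 + PySem.List.pyGetD s j 0) j with
  | none => out
  | some k =>
      let out' := if out = [] then [PySem.List.pyGetD s i 0, PySem.List.pyGetD s j 0] else out
      chainLoop s j k (out' ++ [PySem.List.pyGetD s k 0])
termination_by ((s.length : Int) - j).toNat
decreasing_by
  rcases chainNext_posMap_bounds _ _ _ _ h with ⟨h1, h2⟩; omega

-- for d in range(n-1): if n-d <= len(best): break; …
def bestLoop (s : List Int) (d : Int) (best : List Int) : List Int :=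
  if d < (s.length : Int) - 1 then
    if (s.length : Int) - d ≤ (best.length : Int) then best
    else
      let c := chainLoop s d (d + 1) []
      bestLoop s (d + 1) (if best.length < c.length then c else best)
  else best
termination_by ((s.length : Int) - d).toNat
decreasing_by omega

def mainSecuancia_alt (secu : List Int) : List Int := bestLoop secu 0 []

-- ===== PRECONDITION & SPEC =====
def Spec_mainSecuancia (secu : List Int) (out : List Int) : Prop := out = mainSecuancia_alt secu
instance (secu : List Int) (out : List Int) : Decidable (Spec_mainSecuancia secu out) := by unfold Spec_mainSecuancia; infer_instance

-- ===== CLAIM (what is proved, stated in full; the proofs are below) =====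
def Claim_equal_mainSecuancia : Prop := ∀ (secu : List Int), Dom_mainSecuancia secu → Spec_mainSecuancia secu (mainSecuancia secu)

-- ===== LEMMAS AND PROOFS =====

theorem find?_congr_mem {α : Type} {l : List α} {p q : α → Bool}
    (h : ∀ a ∈ l, p a = q a) : l.find? p = l.find? q := by
  induction l with
  | nil => rfl
  | cons x xs ih =>
    have hx := h x (List.mem_cons_self)
    simp only [List.find?_cons, hx]
    cases q x with
    | true => rfl
    | false => exact ih fun a ha => h a (List.mem_cons_of_mem _ ha)

theorem secAInner_eq_find (s : List Int) (v : Int) (k0 : Int) :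
    secAInner s v k0 =
      (PySem.List.pyRange k0 s.length 1).find? (fun k => decide (v = PySem.List.pyGetD s k 0)) := by
  fun_induction secAInner s v k0 with
  | case1 k hk hv =>
    rw [PySem.List.pyRange_one_cons (by omega)]
    simp [hv]
  | case2 k hk hv ih =>
    rw [PySem.List.pyRange_one_cons (by omega)]
    simp only [List.find?_cons]
    rw [show decide (v = PySem.List.pyGetD s k 0) = false from by simpa using hv]
    exact ih
  | case3 k hk =>
    rw [PySem.List.pyRange_one_eq_nil (by omega)]
    rfl

theorem chainNext_eq (s : List Int) (v j : Int) (hj : 0 ≤ j) :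
    chainNext (posMap s) v j =
      (PySem.List.pyRange (j + 1) s.length 1).find? (fun k => decide (v = PySem.List.pyGetD s k 0)) := by
  unfold chainNext
  rw [posMap_getD, List.find?_filter]
  by_cases hle : j + 1 ≤ (s.length : Int)
  · rw [PySem.List.pyRange_one_append 0 (j + 1) s.length (by omega) hle, List.find?_append]
    have h1 : (PySem.List.pyRange 0 (j + 1) 1).find?
        (fun a => decide ((PySem.List.pyGetD s a 0 == v) = true ∧ decide (j < a) = true)) = none := by
      rw [List.find?_eq_none]
      intro x hx
      have := (PySem.List.mem_pyRange_one).1 hx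
      simp only [decide_eq_true_eq, beq_iff_eq, not_and]
      intro _
      omega
    rw [h1, Option.none_or]
    apply find?_congr_mem
    intro a ha
    have := (PySem.List.mem_pyRange_one).1 ha
    simp only [beq_iff_eq, decide_eq_true_eq]
    rw [decide_eq_decide]
    constructor
    · rintro ⟨h1, _⟩; exact h1.symm
    · intro h1; exact ⟨h1.symm, by omega⟩
  · have h2 : PySem.List.pyRange (j + 1) (s.length : Int) 1 = [] :=
      PySem.List.pyRange_one_eq_nil (by omega)
    rw [h2, List.find?_nil, List.find?_eq_none]
    intro x hx
    have := (PySem.List.mem_pyRange_one).1 hx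
    simp only [decide_eq_true_eq, beq_iff_eq, not_and]
    intro _
    omega

theorem map_add_pyRange_one (c a b : Int) :
    (PySem.List.pyRange a b 1).map (fun x => c + x) = PySem.List.pyRange (c + a) (c + b) 1 := by
  rw [PySem.List.pyRange_one, PySem.List.pyRange_one, List.map_map]
  have hn : (c + b - (c + a)).toNat = (b - a).toNat := by omega
  rw [hn]
  apply List.map_congr_left
  intro k _
  simp [Function.comp]
  ring

theorem pyGetD_drop (s : List Int) (dn : Nat) (i : Int) (hi : 0 ≤ i) :
    PySem.List.pyGetD (s.drop dn) i 0 = PySem.List.pyGetD s ((dn : Int) + i) 0 := by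
  rw [PySem.List.pyGetD_of_nonneg _ _ hi, PySem.List.pyGetD_of_nonneg _ _ (by omega)]
  have h1 : ((dn : Int) + i).toNat = dn + i.toNat := by omega
  rw [h1]
  simp [List.getD, List.getElem?_drop]

theorem next_eq (s : List Int) (v : Int) (d j : Int) (hd : 0 ≤ d) (hj : 0 ≤ j) :
    chainNext (posMap s) v (d + j) =
      (secAInner (s.drop d.toNat) v (j + 1)).map (fun kl => d + kl) := by
  rw [chainNext_eq s v (d + j) (by omega), secAInner_eq_find]
  by_cases hdl : d ≤ (s.length : Int)
  · have hlen : (((s.drop d.toNat).length : Int)) = (s.length : Int) - d := by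
      simp; omega
    rw [hlen]
    have hmap : (PySem.List.pyRange (j + 1) ((s.length : Int) - d) 1).map (fun x => d + x)
        = PySem.List.pyRange (d + j + 1) (s.length : Int) 1 := by
      rw [map_add_pyRange_one]
      congr 1 <;> ring
    rw [← hmap, List.find?_map]
    congr 1
    apply find?_congr_mem
    intro a ha
    have hmem := (PySem.List.mem_pyRange_one).1 ha
    simp only [Function.comp]
    rw [pyGetD_drop s d.toNat a (by omega)]
    rw [Int.toNat_of_nonneg hd]
  · have hlen : ((s.drop d.toNat).length : Int) = 0 := by simp; omega
    rw [hlen, PySem.List.pyRange_one_eq_nil (by omega), PySem.List.pyRange_one_eq_nil (by omega)]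
    rfl

theorem chain_eq (s : List Int) (d i j : Int) (out : List Int)
    (hd : 0 ≤ d) (hi : 0 ≤ i) (hij : i < j) (hj : d + j < (s.length : Int))
    (hout : out = [] ↔ i = 0) :
    secALoop (s.drop d.toNat) i j out = chainLoop s (d + i) (d + j) out := by
  have hlen : ((s.drop d.toNat).length : Int) = (s.length : Int) - d := by
    simp; omega
  have g1 : PySem.List.pyGetD (s.drop d.toNat) i 0 = PySem.List.pyGetD s (d + i) 0 := by
    have h := pyGetD_drop s d.toNat i hi
    rwa [Int.toNat_of_nonneg hd] at h
  have g2 : PySem.List.pyGetD (s.drop d.toNat) j 0 = PySem.List.pyGetD s (d + j) 0 := by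
    have h := pyGetD_drop s d.toNat j (by omega)
    rwa [Int.toNat_of_nonneg hd] at h
  rw [secALoop.eq_def, chainLoop.eq_def]
  rw [if_pos (show i < ((s.drop d.toNat).length : Int) - 1 by rw [hlen]; omega)]
  simp only [g1, g2]
  rw [next_eq s _ d j hd (by omega)]
  cases hA : secAInner (s.drop d.toNat)
      (PySem.List.pyGetD s (d + i) 0 + PySem.List.pyGetD s (d + j) 0) (j + 1) with
  | none =>
    rw [← g1, ← g2] at hA
    split
    · simp_all
    · rfl
  | some kl =>
    have hb := secAInner_some_bounds _ _ _ _ hA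
    rw [hlen] at hb
    have g3 : PySem.List.pyGetD (s.drop d.toNat) kl 0 = PySem.List.pyGetD s (d + kl) 0 := by
      have h := pyGetD_drop s d.toNat kl (by omega)
      rwa [Int.toNat_of_nonneg hd] at h
    simp only [Option.map_some]
    rw [← g1, ← g2] at hA
    split
    · next k heq =>
      rw [hA] at heq
      injection heq with hk
      subst hk
      rw [g3]
      by_cases hi0 : i = 0
      · have hout0 : out = [] := hout.2 hi0
        rw [if_pos hi0, if_pos hout0, hout0]
        have := chain_eq s d j kl
            (([] ++ [PySem.List.pyGetD s (d + i) 0, PySem.List.pyGetD s (d + j) 0])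
              ++ [PySem.List.pyGetD s (d + kl) 0]) hd (by omega) (by omega) (by omega)
            (⟨fun hc => by simp at hc, fun hc => absurd hc (by omega)⟩)
        simpa using this
      · have houtne : ¬ out = [] := fun h => hi0 (hout.1 h)
        rw [if_neg hi0, if_neg houtne]
        exact chain_eq s d j kl (out ++ [PySem.List.pyGetD s (d + kl) 0]) hd (by omega)
          (by omega) (by omega) (⟨fun hc => by simp at hc, fun hc => absurd hc (by omega)⟩)
    · next heq => rw [hA] at heq; cases heq
termination_by ((s.length : Int) - (d + j)).toNat
decreasing_by all_goals omega

theorem main_eq (s : List Int) (d : Int) (resp : List Int) (hd : 0 ≤ d) :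
    mainLoopA (s.drop d.toNat) resp.length resp = bestLoop s d resp := by
  rw [bestLoop.eq_def]
  by_cases hlt : d < (s.length : Int) - 1
  · rw [if_pos hlt]
    rw [mainLoopA.eq_def]
    have hlen : (s.drop d.toNat).length = s.length - d.toNat := by simp
    have hdd : (s.drop d.toNat).drop 1 = s.drop ((d + 1).toNat) := by
      rw [List.drop_drop]
      congr 1
      omega
    by_cases hstop : (s.length : Int) - d ≤ (resp.length : Int)
    · rw [if_pos hstop, if_neg (show ¬ resp.length < (s.drop d.toNat).length by omega)]
    · rw [if_neg hstop, if_pos (show resp.length < (s.drop d.toNat).length by omega)]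
      have hsec : Sec (s.drop d.toNat) [] = chainLoop s d (d + 1) [] := by
        have h := chain_eq s d 0 1 [] hd le_rfl (by omega) (by omega) (by simp)
        simpa [Sec] using h
      rw [hsec, hdd]
      show _ = bestLoop s (d + 1)
          (if resp.length < (chainLoop s d (d + 1) []).length then chainLoop s d (d + 1) [] else resp)
      by_cases himp : resp.length < (chainLoop s d (d + 1) []).length
      · rw [if_pos himp, if_pos himp]
        exact main_eq s (d + 1) (chainLoop s d (d + 1) []) (by omega)
      · rw [if_neg himp, if_neg himp]
        exact main_eq s (d + 1) resp (by omega)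
  · rw [if_neg hlt]
    by_cases hge : (s.length : Int) ≤ d
    · rw [List.drop_eq_nil_of_le (show s.length ≤ d.toNat by omega)]
      rw [mainLoopA.eq_def]
      simp
    · have hlen1 : (s.drop d.toNat).length = 1 := by simp; omega
      rw [mainLoopA.eq_def]
      by_cases hr : resp.length < (s.drop d.toNat).length
      · rw [if_pos hr]
        have hresp : resp = [] := by
          rw [hlen1] at hr
          exact List.eq_nil_of_length_eq_zero (by omega)
        have hsec0 : Sec (s.drop d.toNat) [] = [] := by
          unfold Sec
          rw [secALoop.eq_def]
          rw [if_neg (show ¬ (0 : Int) < ((s.drop d.toNat).length : Int) - 1 by rw [hlen1]; simp)]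
        rw [hsec0, hresp]
        have hnil : (s.drop d.toNat).drop 1 = [] :=
          List.drop_eq_nil_of_le (by omega)
        simp only [List.length_nil]
        rw [if_neg (by omega), hnil, mainLoopA.eq_def]
        simp
      · rw [if_neg hr]
termination_by ((s.length : Int) - d).toNat
decreasing_by all_goals omega

-- ===== VERDICT (by name: the statement is the Claim_ definition above) =====
theorem mainSecuancia_spec : Claim_equal_mainSecuancia := by
  intro secu _
  unfold Spec_mainSecuancia mainSecuancia mainSecuancia_alt
  have := main_eq secu 0 [] le_rfl
  simpa using this
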